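-- pv_equiv track=rewrite | github.com/shiharuharu/cli-agent-mcp | src/cli_agent_mcp/config.py | _parse_tool_list
-- ===== SOURCE A (Python) =====
-- SUPPORTED_TOOLS = frozenset({"codex", "gemini", "claude", "opencode", "banana", "image"})
--
-- def _parse_tool_list(value: str | None) -> set[str]:
--     """解析工具列表环境变量。
--
--     Args:
--         value: 环境变量值，逗号分割，忽略大小写
--
--     Returns:
--         工具集合
--     """
--     if not value or not value.strip():
--         return set()
--
--     tools = set()
--     for item in value.split(","):
--         tool = item.strip().lower()
--         if tool and tool in SUPPORTED_TOOLS: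
--             tools.add(tool)
--
--     return tools
-- ===== SOURCE B (Python) =====
-- SUPPORTED_TOOLS = frozenset({"codex", "gemini", "claude", "opencode", "banana", "image"})
--
--
-- def _parse_tool_list(value):
--     if not value or not value.strip():
--         return set()
--     tools = set()
--     token = []
--     for ch in value + ",":
--         if ch == ",":
--             tool = "".join(token).strip().lower()
--             if tool in SUPPORTED_TOOLS:
--                 tools.add(tool)
--             token = []
--         else:
--             token.append(ch)
--     return tools
-- ===== Notes on version B (the rewrite author's own statement) =====
-- stated objective: alternative
-- what changed: Replaces split(',') plus a per-token filtered accumulation loop by a single character-level scanner over value+',' that builds each token in a buffer and flushes it at every comma; no split and no per-token truthiness test.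
import Mathlib
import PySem

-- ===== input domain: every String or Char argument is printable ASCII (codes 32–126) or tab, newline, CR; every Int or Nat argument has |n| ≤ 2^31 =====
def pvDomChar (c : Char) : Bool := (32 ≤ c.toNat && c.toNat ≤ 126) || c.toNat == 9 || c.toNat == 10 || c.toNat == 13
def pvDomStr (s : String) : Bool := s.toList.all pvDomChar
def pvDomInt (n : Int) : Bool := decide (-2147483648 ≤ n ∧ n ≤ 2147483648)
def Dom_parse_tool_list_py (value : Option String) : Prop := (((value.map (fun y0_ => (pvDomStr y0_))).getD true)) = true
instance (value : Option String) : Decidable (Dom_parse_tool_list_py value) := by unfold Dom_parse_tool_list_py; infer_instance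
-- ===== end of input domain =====

-- B replaces A's split-then-filter loop by a single character-level scanner that flushes tokens at commas (alternative; same cost).

-- module constant SUPPORTED_TOOLS (shared by both versions)
def pvSupported : PySem.Set String :=
  PySem.Set.ofList ["codex", "gemini", "claude", "opencode", "banana", "image"]

-- ===== PORT A =====
def parse_tool_list_py (value : Option String) : List String :=
  match value with
  | none => PySem.Set.empty
  | some v =>
    if v == "" || PySem.Str.strip v == "" then PySem.Set.empty
    else
      ((PySem.Str.split? v ",").getD []).foldl
        (fun tools item =>
          let tool := PySem.Str.lower (PySem.Str.strip item)
          if (tool != "") && PySem.Set.contains pvSupported tool then PySem.Set.add tools tool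
          else tools)
        PySem.Set.empty

-- ===== PORT B =====
-- one scanner step: flush the accumulated token at ',', otherwise extend it
def pvScanStep (st : PySem.Set String × List Char) (ch : Char) : PySem.Set String × List Char :=
  if ch = ',' then
    let tool := String.ofList (PySem.Chars.lower (PySem.Chars.strip st.2))
    (if PySem.Set.contains pvSupported tool then PySem.Set.add st.1 tool else st.1, [])
  else (st.1, st.2 ++ [ch])

-- 'for ch in value + ","' is the fold over v.toList ++ [','] (exact: Python iterates the chars of the concatenation)
def parse_tool_list_py_alt (value : Option String) : List String :=
  match value with
  | none => PySem.Set.empty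
  | some v =>
    if v == "" || PySem.Str.strip v == "" then PySem.Set.empty
    else ((v.toList ++ [',']).foldl pvScanStep (PySem.Set.empty, [])).1

-- ===== PRECONDITION & SPEC =====
def Spec_parse_tool_list_py (value : Option String) (out : List String) : Prop := out = parse_tool_list_py_alt value
instance (value : Option String) (out : List String) : Decidable (Spec_parse_tool_list_py value out) := by unfold Spec_parse_tool_list_py; infer_instance

-- ===== CLAIM (what is proved, stated in full; the proofs are below) =====
def Claim_equal_parse_tool_list_py : Prop := ∀ (value : Option String), Dom_parse_tool_list_py value → Spec_parse_tool_list_py value (parse_tool_list_py value)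

-- ===== LEMMAS AND PROOFS =====

-- reference structural split on ',' with an explicit current-prefix accumulator
def pvSplitC (pre : List Char) : List Char → List (List Char)
  | [] => [pre]
  | c :: rest => if c = ',' then pre :: pvSplitC [] rest else pvSplitC (pre ++ [c]) rest

-- PySem's fuel-based splitOn with sep "," computes pvSplitC
theorem splitOn_go_eq (l : List Char) : ∀ (fuel : Nat) (cur : List Char) (acc : List (List Char)),
    l.length < fuel →
    PySem.Chars.splitOn.go [','] fuel l cur acc = acc.reverse ++ pvSplitC cur.reverse l := by
  induction l with
  | nil =>
    intro fuel cur acc h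
    match fuel, h with
    | fuel + 1, _ => simp [PySem.Chars.splitOn.go, pvSplitC]
  | cons c rest ih =>
    intro fuel cur acc h
    match fuel, h with
    | fuel + 1, h =>
      by_cases hc : c = ','
      · subst hc
        have hpre : List.isPrefixOf [','] (',' :: rest) = true := by
          simp [List.isPrefixOf]
        rw [show PySem.Chars.splitOn.go [','] (fuel + 1) (',' :: rest) cur acc
              = PySem.Chars.splitOn.go [','] fuel rest [] (cur.reverse :: acc) by
            simp [PySem.Chars.splitOn.go, hpre]]
        rw [ih fuel [] (cur.reverse :: acc) (by simpa using Nat.lt_of_succ_lt_succ h)]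
        simp [pvSplitC]
      · have hpre : List.isPrefixOf [','] (c :: rest) = false := by
          simp only [List.isPrefixOf, Bool.and_true, beq_iff_eq, Bool.eq_false_iff, ne_eq]
          exact fun hh => hc hh.symm
        rw [show PySem.Chars.splitOn.go [','] (fuel + 1) (c :: rest) cur acc
              = PySem.Chars.splitOn.go [','] fuel rest (c :: cur) acc by
            simp [PySem.Chars.splitOn.go, hpre]]
        rw [ih fuel (c :: cur) acc (by simpa using Nat.lt_of_succ_lt_succ h)]
        simp [pvSplitC, hc]

theorem splitOn_eq (l : List Char) : PySem.Chars.splitOn l [','] = pvSplitC [] l := by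
  have := splitOn_go_eq l (l.length + 1) [] [] (Nat.lt_succ_self _)
  simpa [PySem.Chars.splitOn] using this

-- A's per-token step on a piece of the split, with the truthiness test dropped:
-- the empty token is not a supported tool, so 'tool and tool in SUPPORTED_TOOLS' is just membership
def pvAStep (tools : PySem.Set String) (piece : List Char) : PySem.Set String :=
  let tool := String.ofList (PySem.Chars.lower (PySem.Chars.strip piece))
  if PySem.Set.contains pvSupported tool then PySem.Set.add tools tool else tools

theorem astep_eq (tools : PySem.Set String) (piece : List Char) :
    (let tool := PySem.Str.lower (PySem.Str.strip (String.ofList piece))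
     if (tool != "") && PySem.Set.contains pvSupported tool then PySem.Set.add tools tool
     else tools) = pvAStep tools piece := by
  have htool : PySem.Str.lower (PySem.Str.strip (String.ofList piece))
      = String.ofList (PySem.Chars.lower (PySem.Chars.strip piece)) := by
    apply String.toList_injective
    simp [pysem]
  rw [htool]
  unfold pvAStep
  by_cases h : String.ofList (PySem.Chars.lower (PySem.Chars.strip piece)) = ""
  · simp only [h]
    simp only [bne_self_eq_false, Bool.false_and, if_neg Bool.false_ne_true]
    have hc : PySem.Set.contains pvSupported "" = false := by decide
    rw [hc]
    simp
  · simp [h]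

-- the scanner over l ++ [','] is A's fold over the ','-split of l
theorem scan_eq (l : List Char) : ∀ (pre : List Char) (tools : PySem.Set String),
    ((l ++ [',']).foldl pvScanStep (tools, pre)).1 = (pvSplitC pre l).foldl pvAStep tools := by
  induction l with
  | nil =>
    intro pre tools
    simp [pvScanStep, pvSplitC, pvAStep]
  | cons c rest ih =>
    intro pre tools
    by_cases hc : c = ','
    · subst hc
      simp only [List.cons_append, List.foldl_cons, pvSplitC, if_pos]
      rw [show pvScanStep (tools, pre) ','
            = (pvAStep tools pre, []) by simp [pvScanStep, pvAStep]]
      exact ih [] _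
    · simp only [List.cons_append, List.foldl_cons, pvSplitC, if_neg hc]
      rw [show pvScanStep (tools, pre) c = (tools, pre ++ [c]) by simp [pvScanStep, hc]]
      exact ih (pre ++ [c]) tools

-- ===== VERDICT (by name: the statement is the Claim_ definition above) =====
theorem parse_tool_list_py_spec : Claim_equal_parse_tool_list_py := by
  intro value _
  unfold Spec_parse_tool_list_py
  cases value with
  | none => rfl
  | some v =>
    simp only [parse_tool_list_py, parse_tool_list_py_alt]
    by_cases h : (v == "" || PySem.Str.strip v == "") = true
    · rw [if_pos h, if_pos h]
    · rw [if_neg h, if_neg h]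
      have hsplit : (PySem.Str.split? v ",").getD []
          = (pvSplitC [] v.toList).map String.ofList := by
        simp [PySem.Str.split?, PySem.Chars.split?, splitOn_eq]
      rw [hsplit, scan_eq v.toList [] PySem.Set.empty, List.foldl_map]
      have hfun : (fun (tools : PySem.Set String) (piece : List Char) =>
          let tool := PySem.Str.lower (PySem.Str.strip (String.ofList piece))
          if (tool != "") && PySem.Set.contains pvSupported tool then PySem.Set.add tools tool
          else tools) = pvAStep := by
        funext t p
        exact astep_eq t p
      rw [hfun]
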